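-- pv_equiv track=rewrite | github.com/allexxlekk/data-mining-24 | data_visualization.py | find_top_participant_per_activity
-- ===== SOURCE A (Python) =====
-- def find_top_participant_per_activity(durations_dict):
--     top_participant_per_activity = {}
--
--     activity_participants = {}
--
--     for participant, activities in durations_dict.items():
--         for activity_name, duration in activities.items():
--             if activity_name not in activity_participants:
--                 activity_participants[activity_name] = {}
--             activity_participants[activity_name][participant] = duration
--
--     for activity_name, participants_durations in activity_participants.items():
--         # Find the participant with the maximum duration for the current activity
--         top_participant = max(participants_durations, key=participants_durations.get)
--         top_participant_per_activity[activity_name] = top_participant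
--
--     return top_participant_per_activity
-- ===== SOURCE B (Python) =====
-- def find_top_participant_per_activity(durations_dict):
--     # One pass: keep only the running best (participant, duration) per activity.
--     best = {}
--     for participant, activities in durations_dict.items():
--         for activity_name, duration in activities.items():
--             current = best.get(activity_name)
--             if current is None or current[1] < duration:
--                 best[activity_name] = (participant, duration)
--     return {activity_name: p for activity_name, (p, _) in best.items()}
-- ===== Notes on version B (the rewrite author's own statement) =====
-- stated objective: simpler
-- what changed: Single pass keeping only the running best (participant, duration) per activity in one dict (strict > replacement), instead of building a full activity->participant->duration inverted index and then taking a max per activity; Pre_ only excludes association lists with duplicate participant keys or duplicate activity keys within one participant, which do not represent a Python dict.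
import Mathlib
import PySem

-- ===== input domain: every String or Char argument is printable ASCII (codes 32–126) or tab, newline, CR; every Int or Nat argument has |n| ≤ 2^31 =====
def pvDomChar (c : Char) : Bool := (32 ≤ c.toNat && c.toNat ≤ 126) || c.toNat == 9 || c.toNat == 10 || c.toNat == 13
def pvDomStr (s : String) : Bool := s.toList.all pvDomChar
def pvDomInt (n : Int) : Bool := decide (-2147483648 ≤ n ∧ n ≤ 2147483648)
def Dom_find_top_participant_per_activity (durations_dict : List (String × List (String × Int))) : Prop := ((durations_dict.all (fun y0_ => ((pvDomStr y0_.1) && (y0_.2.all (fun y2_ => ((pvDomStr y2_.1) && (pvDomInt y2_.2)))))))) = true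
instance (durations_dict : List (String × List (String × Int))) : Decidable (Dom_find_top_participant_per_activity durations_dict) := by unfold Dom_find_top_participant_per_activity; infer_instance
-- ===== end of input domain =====

-- B replaces A's two passes (full activity->participant->duration index, then a max per activity)
-- by one pass keeping only the running best (participant, duration) per activity; equal return values.

-- ===== PORT A =====
-- The '.getD ""' arm is unreachable: every inner dict is created together with its first entry,
-- so Python's max never sees an empty sequence here.
def find_top_participant_per_activity (durations_dict : List (String × List (String × Int))) : List (String × String) :=
  let ap : PySem.Dict String (PySem.Dict String Int) :=
    durations_dict.foldl (fun ap pa =>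
      pa.2.foldl (fun ap ad =>
        let ap1 := if ap.contains ad.1 then ap else ap.insert ad.1 PySem.Dict.empty
        ap1.insert ad.1 ((ap1.getD ad.1 PySem.Dict.empty).insert pa.1 ad.2)) ap)
      PySem.Dict.empty
  (ap.items.foldl (fun r q =>
      r.insert q.1 ((PySem.List.max? q.2.keys (fun k => q.2.getD k 0)).getD "")) PySem.Dict.empty).items

-- ===== PORT B =====
def find_top_participant_per_activity_alt (durations_dict : List (String × List (String × Int))) : List (String × String) :=
  let best : PySem.Dict String (String × Int) :=
    durations_dict.foldl (fun best pa =>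
      pa.2.foldl (fun best ad =>
        match best.get? ad.1 with
        | none => best.insert ad.1 (pa.1, ad.2)
        | some cur => if cur.2 < ad.2 then best.insert ad.1 (pa.1, ad.2) else best) best)
      PySem.Dict.empty
  (best.items.foldl (fun r q => r.insert q.1 q.2.1) PySem.Dict.empty).items

-- ===== PRECONDITION & SPEC =====
-- Pre_ excludes association lists with duplicate participant keys, or duplicate activity keys within
-- one participant: such lists do not represent a Python dict (A's argument is a dict of dicts), and on
-- them dict-overwrite order is accidental.
def Pre_find_top_participant_per_activity (durations_dict : List (String × List (String × Int))) : Prop :=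
  (durations_dict.map (fun pa => pa.1)).Nodup ∧ ∀ pa ∈ durations_dict, (pa.2.map (fun ad => ad.1)).Nodup
instance (durations_dict : List (String × List (String × Int))) : Decidable (Pre_find_top_participant_per_activity durations_dict) := by unfold Pre_find_top_participant_per_activity; infer_instance

def pvWitness_find_top_participant_per_activity : (List (String × List (String × Int))) :=
  [("alice", [("run", 3), ("swim", 5)]), ("bob", [("run", 4)])]

def Spec_find_top_participant_per_activity (durations_dict : List (String × List (String × Int))) (out : List (String × String)) : Prop := out = find_top_participant_per_activity_alt durations_dict
instance (durations_dict : List (String × List (String × Int))) (out : List (String × String)) : Decidable (Spec_find_top_participant_per_activity durations_dict out) := by unfold Spec_find_top_participant_per_activity; infer_instance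

-- ===== CLAIM (what is proved, stated in full; the proofs are below) =====
def Claim_equal_find_top_participant_per_activity : Prop := ∀ (durations_dict : List (String × List (String × Int))), Dom_find_top_participant_per_activity durations_dict → Pre_find_top_participant_per_activity durations_dict → Spec_find_top_participant_per_activity durations_dict (find_top_participant_per_activity durations_dict)

-- ===== LEMMAS AND PROOFS =====

-- the flattened item stream: one triple (participant, activity, duration) per inner entry
def pvTs (dd : List (String × List (String × Int))) : List (String × String × Int) :=
  dd.flatMap (fun pa => pa.2.map (fun ad => (pa.1, ad.1, ad.2)))

-- A's inner-loop body as a step over one triple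
def pvStepA (ap : PySem.Dict String (PySem.Dict String Int)) (t : String × String × Int) :
    PySem.Dict String (PySem.Dict String Int) :=
  let ap1 := if ap.contains t.2.1 then ap else ap.insert t.2.1 PySem.Dict.empty
  ap1.insert t.2.1 ((ap1.getD t.2.1 PySem.Dict.empty).insert t.1 t.2.2)

-- B's inner-loop body as a step over one triple
def pvStepB (b : PySem.Dict String (String × Int)) (t : String × String × Int) :
    PySem.Dict String (String × Int) :=
  match b.get? t.2.1 with
  | none => b.insert t.2.1 (t.1, t.2.2)
  | some cur => if cur.2 < t.2.2 then b.insert t.2.1 (t.1, t.2.2) else b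

-- first key attaining the maximal value (what A's max(..., key=get) picks), and that key with its value
def pvTopKey (pd : PySem.Dict String Int) : String :=
  (PySem.List.max? pd.keys (fun k => pd.getD k 0)).getD ""
def pvFmax (pd : PySem.Dict String Int) : String × Int :=
  (pvTopKey pd, pd.getD (pvTopKey pd) 0)

lemma pv_foldl_flat {σ : Type} (g : σ → String × String × Int → σ)
    (dd : List (String × List (String × Int))) (s0 : σ) :
    dd.foldl (fun s pa => pa.2.foldl (fun s ad => g s (pa.1, ad.1, ad.2)) s) s0
      = (pvTs dd).foldl g s0 := by
  induction dd generalizing s0 with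
  | nil => rfl
  | cons pa dd ih =>
    simp only [pvTs, List.flatMap_cons, List.foldl_append, List.foldl_cons, List.foldl_map] at *
    rw [ih]

lemma pv_mem_ts_fst {dd : List (String × List (String × Int))} {t : String × String × Int}
    (h : t ∈ pvTs dd) : t.1 ∈ dd.map (fun pa => pa.1) := by
  simp only [pvTs, List.mem_flatMap, List.mem_map] at h
  obtain ⟨pa, hpa, ad, _, rfl⟩ := h
  exact List.mem_map.2 ⟨pa, hpa, rfl⟩

lemma pv_pairs_nodup (dd : List (String × List (String × Int)))
    (h1 : (dd.map (fun pa => pa.1)).Nodup)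
    (h2 : ∀ pa ∈ dd, (pa.2.map (fun ad => ad.1)).Nodup) :
    ((pvTs dd).map (fun t => (t.1, t.2.1))).Nodup := by
  induction dd with
  | nil => simp [pvTs]
  | cons pa dd ih =>
    simp only [pvTs, List.flatMap_cons, List.map_append, List.map_map] at *
    rw [List.nodup_append]
    refine ⟨?_, ih h1.of_cons (fun x hx => h2 x (List.mem_cons_of_mem _ hx)), ?_⟩
    · have := h2 pa (List.mem_cons_self ..)
      have : (pa.2.map (fun ad => ad.1)).map (fun a => (pa.1, a)) |>.Nodup :=
        this.map (fun a b h => by simpa using congrArg Prod.snd h)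
      simpa [List.map_map, Function.comp] using this
    · intro x hx y hy hxy
      simp only [List.mem_map, Function.comp] at hx hy
      obtain ⟨ad, _, rfl⟩ := hx
      obtain ⟨t, ht, rfl⟩ := hy
      have hmem : t.1 ∈ dd.map (fun pa => pa.1) := pv_mem_ts_fst ht
      have h : pa.1 = t.1 := congrArg Prod.fst hxy
      simp only [List.map_cons, List.nodup_cons] at h1
      exact h1.1 (h ▸ hmem)

-- two items with the same key in a Nodup-keyed dict are equal
lemma pv_unique {ν : Type} {d : PySem.Dict String ν} {q : String × ν} {k : String} {v : ν}
    (h1 : d.keys.Nodup) (hq : q ∈ d.items) (hv : (k, v) ∈ d.items) (hk : q.1 = k) : q = (k, v) := by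
  have e1 : d.get? k = some v := PySem.Dict.get?_of_mem_items d hv h1
  have e2 : d.get? q.1 = some q.2 := PySem.Dict.get?_of_mem_items d (by exact hq) h1
  rw [hk, e1] at e2
  exact Prod.ext hk (Option.some.inj e2).symm

lemma pv_fmax_single (p : String) (d : Int) :
    pvFmax (PySem.Dict.empty.insert p d) = (p, d) := by
  have hk : (PySem.Dict.empty.insert p d).keys = [p] := by
    simp [PySem.Dict.keys_insert_of_not_contains, PySem.Dict.contains_empty, PySem.Dict.keys_empty]
  simp [pvFmax, pvTopKey, hk, PySem.List.max?, PySem.Dict.getD_insert_self]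

lemma pv_max_fold_congr {α : Type} (f g : α → Int) :
    ∀ (xs : List α) (acc : Option α), (∀ x ∈ xs, f x = g x) → (∀ m ∈ acc, f m = g m) →
    List.foldl (fun acc x => match acc with
        | none => some x | some m => if f m < f x then some x else some m) acc xs
      = List.foldl (fun acc x => match acc with
        | none => some x | some m => if g m < g x then some x else some m) acc xs := by
  intro xs
  induction xs with
  | nil => intros; rfl
  | cons x xs ih =>
    intro acc hx hm
    have hfx := hx x (List.mem_cons_self ..)
    have htail : ∀ y ∈ xs, f y = g y := fun y hy => hx y (List.mem_cons_of_mem _ hy)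
    cases acc with
    | none =>
      simp only [List.foldl_cons]
      exact ih (some x) htail (by
        intro m' hm'
        simp only [Option.mem_def, Option.some.injEq] at hm'
        subst hm'; exact hfx)
    | some m =>
      have hgm := hm m (by simp)
      simp only [List.foldl_cons, hgm, hfx]
      by_cases hlt : g m < g x
      · simp only [hlt, if_true]
        exact ih (some x) htail (by
          intro m' hm'
          simp only [Option.mem_def, Option.some.injEq] at hm'
          subst hm'; exact hfx)
      · simp only [hlt, if_false]
        exact ih (some m) htail (by
          intro m' hm'
          simp only [Option.mem_def, Option.some.injEq] at hm'
          subst hm'; exact hgm)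

lemma pv_max?_append_singleton {α : Type} (xs : List α) (x : α) (f : α → Int) :
    PySem.List.max? (xs ++ [x]) f = match PySem.List.max? xs f with
      | none => some x
      | some m => if f m < f x then some x else some m := by
  unfold PySem.List.max?
  rw [List.foldl_append]
  rfl

lemma pv_fmax_insert {pd : PySem.Dict String Int} {p : String} {d : Int}
    (hne : pd.keys ≠ []) (hp : p ∉ pd.keys) :
    pvFmax (pd.insert p d) = if (pvFmax pd).2 < d then (p, d) else pvFmax pd := by
  have hc : pd.contains p = false := by
    rw [← Bool.not_eq_true, PySem.Dict.contains_iff_mem_keys]; exact hp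
  have hk : (pd.insert p d).keys = pd.keys ++ [p] := PySem.Dict.keys_insert_of_not_contains _ _ hc
  have hcong : PySem.List.max? pd.keys (fun k => (pd.insert p d).getD k 0)
      = PySem.List.max? pd.keys (fun k => pd.getD k 0) := by
    unfold PySem.List.max?
    refine pv_max_fold_congr _ _ pd.keys none ?_ (by intro m hm; simp at hm)
    intro k hkmem
    have : k ≠ p := fun h => hp (h ▸ hkmem)
    rw [PySem.Dict.getD_insert_of_ne _ _ _ this]
  obtain ⟨t, ht⟩ : ∃ t, PySem.List.max? pd.keys (fun k => pd.getD k 0) = some t := by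
    cases h : PySem.List.max? pd.keys (fun k => pd.getD k 0) with
    | none => exact absurd ((PySem.List.max?_eq_none_iff _ _).1 h) hne
    | some t => exact ⟨t, rfl⟩
  have htmem : t ∈ pd.keys := PySem.List.max?_mem ht
  have htp : t ≠ p := fun h => hp (h ▸ htmem)
  have hmax' : PySem.List.max? (pd.insert p d).keys (fun k => (pd.insert p d).getD k 0)
      = if pd.getD t 0 < d then some p else some t := by
    rw [hk, pv_max?_append_singleton, hcong, ht]
    show (if (pd.insert p d).getD t 0 < (pd.insert p d).getD p 0 then some p else some t) = _
    rw [PySem.Dict.getD_insert_of_ne _ _ _ htp, PySem.Dict.getD_insert_self]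
  have htop : pvTopKey pd = t := by simp [pvTopKey, ht]
  by_cases hlt : pd.getD t 0 < d
  · have : pvTopKey (pd.insert p d) = p := by simp [pvTopKey, hmax', hlt]
    simp [pvFmax, this, htop, hlt, PySem.Dict.getD_insert_self]
  · have : pvTopKey (pd.insert p d) = t := by simp [pvTopKey, hmax', hlt]
    simp [pvFmax, this, htop, hlt, PySem.Dict.getD_insert_of_ne _ _ _ htp]

-- one simultaneous step preserves the invariant
lemma pv_step (ap : PySem.Dict String (PySem.Dict String Int)) (best : PySem.Dict String (String × Int))
    (t : String × String × Int)
    (h1 : ap.keys.Nodup)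
    (h2 : ∀ q ∈ ap.items, q.2.keys ≠ [] ∧ q.2.keys.Nodup)
    (h3 : best.items = ap.items.map (fun q => (q.1, pvFmax q.2)))
    (h4 : ∀ q ∈ ap.items, t.2.1 = q.1 → t.1 ∉ q.2.keys) :
    (pvStepA ap t).keys.Nodup ∧
    (∀ q ∈ (pvStepA ap t).items, q.2.keys ≠ [] ∧ q.2.keys.Nodup) ∧
    ((pvStepB best t).items = (pvStepA ap t).items.map (fun q => (q.1, pvFmax q.2))) ∧
    (∀ q' ∈ (pvStepA ap t).items, ∀ x ∈ q'.2.keys,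
      (x = t.1 ∧ q'.1 = t.2.1) ∨ ∃ q ∈ ap.items, q.1 = q'.1 ∧ x ∈ q.2.keys) := by
  obtain ⟨p, a, d⟩ := t
  have hbkeys : best.keys = ap.keys := by
    simp only [PySem.Dict.keys, h3, List.map_map]; rfl
  by_cases hc : ap.contains a = true
  · -- the activity already has an inner dict pd
    have ha : a ∈ ap.keys := (PySem.Dict.contains_iff_mem_keys _ _).1 hc
    obtain ⟨q0, hq0, hq0a⟩ := List.mem_map.1 (by simpa only [PySem.Dict.keys] using ha)
    have hmem : (a, q0.2) ∈ ap.items := by rw [← hq0a]; exact hq0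
    set pd := q0.2 with hpddef
    have hget : ap.get? a = some pd := PySem.Dict.get?_of_mem_items _ hmem h1
    have hA : pvStepA ap (p, a, d) = ap.insert a (pd.insert p d) := by
      simp only [pvStepA, hc, if_true, PySem.Dict.getD_of_get?_eq_some _ _ hget]
    have hpne : pd.keys ≠ [] := (h2 _ hmem).1
    have hpnd : pd.keys.Nodup := (h2 _ hmem).2
    have hp : p ∉ pd.keys := h4 (a, pd) hmem rfl
    have hpc : pd.contains p = false := by
      rw [← Bool.not_eq_true, PySem.Dict.contains_iff_mem_keys]; exact hp
    have hinnerkeys : (pd.insert p d).keys = pd.keys ++ [p] :=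
      PySem.Dict.keys_insert_of_not_contains _ _ hpc
    have hfm := pv_fmax_insert (d := d) hpne hp
    have hitemsA : (pvStepA ap (p, a, d)).items
        = ap.items.map (fun q => if q.1 == a then (a, pd.insert p d) else q) := by
      rw [hA]; exact PySem.Dict.items_insert_of_contains _ _ hc
    have hkeysA : (pvStepA ap (p, a, d)).keys = ap.keys := by
      rw [hA]; exact PySem.Dict.keys_insert_of_contains _ _ hc
    have hinnernodup : (pd.insert p d).keys.Nodup := by
      rw [hinnerkeys, List.nodup_append]
      exact ⟨hpnd, List.nodup_singleton _, by
        intro y hy b hb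
        simp only [List.mem_singleton] at hb
        subst hb
        exact fun h => hp (h ▸ hy)⟩
    refine ⟨by rw [hkeysA]; exact h1, ?_, ?_, ?_⟩
    · intro q' hq'
      rw [hitemsA] at hq'
      obtain ⟨q, hq, hq'eq⟩ := List.mem_map.1 hq'
      by_cases hqa : q.1 = a
      · rw [← hq'eq]
        simp only [hqa, beq_self_eq_true, if_true]
        refine ⟨by rw [hinnerkeys]; simp, hinnernodup⟩
      · rw [← hq'eq]
        simp only [beq_iff_eq, hqa, if_false]
        exact h2 q hq
    · have hbnd : best.keys.Nodup := by rw [hbkeys]; exact h1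
      have hbmem : (a, pvFmax pd) ∈ best.items := by
        rw [h3]; exact List.mem_map_of_mem hmem
      have hbget : best.get? a = some (pvFmax pd) := PySem.Dict.get?_of_mem_items _ hbmem hbnd
      have hB : pvStepB best (p, a, d)
          = if (pvFmax pd).2 < d then best.insert a (p, d) else best := by
        simp only [pvStepB, hbget]
      by_cases hlt : (pvFmax pd).2 < d
      · rw [hB, if_pos hlt, hitemsA]
        have hbc : best.contains a = true := by
          rw [PySem.Dict.contains_iff_mem_keys, hbkeys]; exact ha
        rw [PySem.Dict.items_insert_of_contains _ _ hbc, h3, List.map_map, List.map_map]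
        refine List.map_congr_left ?_
        intro q hq
        by_cases hqa : q.1 = a
        · have heq := pv_unique h1 hq hmem hqa
          rw [heq]
          simp [Function.comp, hfm, hlt]
        · simp [Function.comp, hqa]
      · rw [hB, if_neg hlt, hitemsA, h3, List.map_map]
        refine List.map_congr_left ?_
        intro q hq
        by_cases hqa : q.1 = a
        · have heq := pv_unique h1 hq hmem hqa
          rw [heq]
          simp [Function.comp, hfm, hlt]
        · simp [Function.comp, hqa]
    · intro q' hq' x hx
      rw [hitemsA] at hq'
      obtain ⟨q, hq, hq'eq⟩ := List.mem_map.1 hq'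
      by_cases hqa : q.1 = a
      · have heq := pv_unique h1 hq hmem hqa
        rw [heq] at hq'eq
        simp only [beq_self_eq_true, if_true] at hq'eq
        subst hq'eq
        rw [hinnerkeys] at hx
        rcases List.mem_append.1 hx with h | h
        · exact Or.inr ⟨(a, pd), hmem, rfl, h⟩
        · simp only [List.mem_singleton] at h
          exact Or.inl ⟨h, rfl⟩
      · rw [if_neg (by simpa using hqa)] at hq'eq
        subst hq'eq
        exact Or.inr ⟨q, hq, rfl, hx⟩
  · -- first triple for this activity
    have hcf : ap.contains a = false := by simpa using hc
    have hana : a ∉ ap.keys := by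
      rw [← PySem.Dict.contains_iff_mem_keys, hcf]; simp
    have hA : pvStepA ap (p, a, d) = ap.insert a (PySem.Dict.empty.insert p d) := by
      simp only [pvStepA, hcf, Bool.false_eq_true, if_false, PySem.Dict.getD_insert_self,
        PySem.Dict.insert_insert_self]
    have hitemsA : (pvStepA ap (p, a, d)).items
        = ap.items ++ [(a, PySem.Dict.empty.insert p d)] := by
      rw [hA]; exact PySem.Dict.items_insert_of_not_contains _ _ hcf
    have hikeys : (PySem.Dict.empty.insert p d).keys = [p] := by
      rw [PySem.Dict.keys_insert_of_not_contains _ _ (PySem.Dict.contains_empty p)]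
      simp [PySem.Dict.keys_empty]
    refine ⟨?_, ?_, ?_, ?_⟩
    · rw [hA, PySem.Dict.keys_insert_of_not_contains _ _ hcf, List.nodup_append]
      exact ⟨h1, List.nodup_singleton _, by
        intro y hy b hb
        simp only [List.mem_singleton] at hb
        subst hb
        exact fun h => hana (h ▸ hy)⟩
    · intro q' hq'
      rw [hitemsA] at hq'
      rcases List.mem_append.1 hq' with h | h
      · exact h2 q' h
      · simp only [List.mem_singleton] at h
        subst h
        exact ⟨by rw [hikeys]; simp, by rw [hikeys]; exact List.nodup_singleton _⟩
    · have hbget : best.get? a = none :=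
        (PySem.Dict.get?_eq_none_iff_not_mem_keys _ _).2 (by rw [hbkeys]; exact hana)
      have hbc : best.contains a = false := by
        rw [← Bool.not_eq_true, PySem.Dict.contains_iff_mem_keys, hbkeys]; exact hana
      rw [show pvStepB best (p, a, d) = best.insert a (p, d) from by simp only [pvStepB, hbget]]
      rw [PySem.Dict.items_insert_of_not_contains _ _ hbc, hitemsA, List.map_append, h3]
      simp only [List.map_cons, List.map_nil, pv_fmax_single]
    · intro q' hq' x hx
      rw [hitemsA] at hq'
      rcases List.mem_append.1 hq' with h | h
      · exact Or.inr ⟨q', h, rfl, hx⟩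
      · simp only [List.mem_singleton] at h
        subst h
        rw [hikeys] at hx
        simp only [List.mem_singleton] at hx
        exact Or.inl ⟨hx, rfl⟩

lemma pv_main (ts : List (String × String × Int)) :
    ∀ (ap : PySem.Dict String (PySem.Dict String Int)) (best : PySem.Dict String (String × Int)),
    ap.keys.Nodup →
    (∀ q ∈ ap.items, q.2.keys ≠ [] ∧ q.2.keys.Nodup) →
    best.items = ap.items.map (fun q => (q.1, pvFmax q.2)) →
    (∀ t ∈ ts, ∀ q ∈ ap.items, t.2.1 = q.1 → t.1 ∉ q.2.keys) →
    ((ts.map (fun t => (t.1, t.2.1))).Nodup) →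
    (ts.foldl pvStepA ap).keys.Nodup ∧
    (ts.foldl pvStepB best).items = (ts.foldl pvStepA ap).items.map (fun q => (q.1, pvFmax q.2)) := by
  induction ts with
  | nil => exact fun ap best h1 _ h3 _ _ => ⟨h1, h3⟩
  | cons t ts ih =>
    intro ap best h1 h2 h3 h4 h5
    simp only [List.map_cons, List.nodup_cons] at h5
    obtain ⟨s1, s2, s3, s4⟩ := pv_step ap best t h1 h2 h3 (h4 t (List.mem_cons_self ..))
    simp only [List.foldl_cons]
    refine ih (pvStepA ap t) (pvStepB best t) s1 s2 s3 ?_ h5.2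
    intro t' ht' q' hq' heq hmem
    rcases s4 q' hq' t'.1 hmem with ⟨hx, hk⟩ | ⟨q, hq, hk, hx⟩
    · exact h5.1 (List.mem_map.2 ⟨t', ht', by rw [hx, heq, hk]⟩)
    · exact h4 t' (List.mem_cons_of_mem _ ht') q hq (heq.trans hk.symm) hx

-- the ports as flat folds
lemma pv_flatA (dd : List (String × List (String × Int))) :
    dd.foldl (fun ap pa =>
      pa.2.foldl (fun ap ad =>
        let ap1 := if ap.contains ad.1 then ap else ap.insert ad.1 PySem.Dict.empty
        ap1.insert ad.1 ((ap1.getD ad.1 PySem.Dict.empty).insert pa.1 ad.2)) ap)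
      PySem.Dict.empty = (pvTs dd).foldl pvStepA PySem.Dict.empty :=
  pv_foldl_flat pvStepA dd _

lemma pv_flatB (dd : List (String × List (String × Int))) :
    dd.foldl (fun best pa =>
      pa.2.foldl (fun best ad =>
        match best.get? ad.1 with
        | none => best.insert ad.1 (pa.1, ad.2)
        | some cur => if cur.2 < ad.2 then best.insert ad.1 (pa.1, ad.2) else best) best)
      PySem.Dict.empty = (pvTs dd).foldl pvStepB PySem.Dict.empty :=
  pv_foldl_flat pvStepB dd _

-- ===== VERDICT (by name: the statement is the Claim_ definition above) =====
theorem find_top_participant_per_activity_spec : Claim_equal_find_top_participant_per_activity := by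
  intro dd _ hpre
  unfold Spec_find_top_participant_per_activity
  unfold find_top_participant_per_activity find_top_participant_per_activity_alt
  rw [pv_flatA, pv_flatB]
  obtain ⟨hAk, hB⟩ := pv_main (pvTs dd) PySem.Dict.empty PySem.Dict.empty
    (by simp [PySem.Dict.keys_empty]) (by intro q hq; simp [PySem.Dict.empty] at hq)
    (by simp [PySem.Dict.empty]) (by intro t _ q hq; simp [PySem.Dict.empty] at hq)
    (pv_pairs_nodup dd hpre.1 hpre.2)
  set apF := (pvTs dd).foldl pvStepA PySem.Dict.empty with hap
  set bestF := (pvTs dd).foldl pvStepB PySem.Dict.empty with hbest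
  have hBk : bestF.keys.Nodup := by
    have : bestF.keys = apF.keys := by
      simp only [PySem.Dict.keys, hB, List.map_map]; rfl
    rw [this]; exact hAk
  have hAres : (apF.items.foldl (fun r q =>
      r.insert q.1 ((PySem.List.max? q.2.keys (fun k => q.2.getD k 0)).getD "")) PySem.Dict.empty).items
      = apF.items.map (fun q => (q.1, pvTopKey q.2)) := by
    have h := PySem.Dict.items_foldl_insert_fresh (l := apF.items) (k := fun q => q.1)
      (v := fun q => pvTopKey q.2) (d := PySem.Dict.empty)
      (by intro a _; simp [PySem.Dict.contains_empty]) (by exact hAk)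
    simpa [pvTopKey, PySem.Dict.empty] using h
  have hBres : (bestF.items.foldl (fun r q => r.insert q.1 q.2.1) PySem.Dict.empty).items
      = bestF.items.map (fun q => (q.1, q.2.1)) := by
    have h := PySem.Dict.items_foldl_insert_fresh (l := bestF.items) (k := fun q => q.1)
      (v := fun q => q.2.1) (d := PySem.Dict.empty)
      (by intro a _; simp [PySem.Dict.contains_empty]) (by exact hBk)
    simpa [PySem.Dict.empty] using h
  rw [hAres, hBres, hB, List.map_map]
  rfl
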